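-- pv_equiv track=rewrite | github.com/yannickloth/W33-Theory | tests/test_matroid_theory_computation.py | _lattice_of_flats
-- ===== SOURCE A (Python) =====
-- class _UnionFind:
--     def __init__(self, n):
--         self.parent = list(range(n))
--         self.sz = [1] * n
--         self.num_components = n
--
--     def find(self, x):
--         while self.parent[x] != x:
--             self.parent[x] = self.parent[self.parent[x]]
--             x = self.parent[x]
--         return x
--
--     def union(self, a, b):
--         a, b = self.find(a), self.find(b)
--         if a == b:
--             return False
--         if self.sz[a] < self.sz[b]:
--             a, b = b, a
--         self.parent[b] = a
--         self.sz[a] += self.sz[b]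
--         self.num_components -= 1
--         return True
--
--     def connected(self, a, b):
--         return self.find(a) == self.find(b)
--
-- def _matroid_rank(edges, n, edge_indices):
--     """Compute rank of edge subset in graphic matroid using union-find."""
--     uf = _UnionFind(n)
--     rank = 0
--     for idx in edge_indices:
--         u, v = edges[idx]
--         if uf.union(u, v):
--             rank += 1
--     return rank
--
-- def _lattice_of_flats(edges, n_sub):
--     """Compute lattice of flats for small matroid.
--
--     A flat is a closed set: cl(F) = F, where
--     cl(S) = {e in E : r(S + e) = r(S)}.
--     """
--     m = len(edges)
--     all_idx = list(range(m))
--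
--     def closure(S):
--         """Compute closure of edge set S."""
--         S_set = set(S)
--         r_S = _matroid_rank(edges, n_sub, list(S_set))
--         cl = set(S_set)
--         for e in range(m):
--             if e not in cl:
--                 if _matroid_rank(edges, n_sub, list(cl | {e})) == r_S:
--                     cl.add(e)
--         # Iterate until stable
--         changed = True
--         while changed:
--             changed = False
--             r_cl = _matroid_rank(edges, n_sub, list(cl))
--             for e in range(m):
--                 if e not in cl:
--                     if _matroid_rank(edges, n_sub, list(cl | {e})) == r_cl:
--                         cl.add(e)
--                         changed = True
--         return frozenset(cl)
--
--     # Find all flats by computing closures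
--     flats = set()
--     # Empty flat
--     flats.add(closure([]))
--     # Single element flats
--     for e in range(m):
--         flats.add(closure([e]))
--     # Pairwise closures
--     for e1 in range(m):
--         for e2 in range(e1 + 1, m):
--             flats.add(closure([e1, e2]))
--     # Full ground set is always a flat
--     flats.add(frozenset(all_idx))
--     # Joins of existing flats
--     flat_list = list(flats)
--     for i in range(len(flat_list)):
--         for j in range(i + 1, len(flat_list)):
--             flats.add(closure(list(flat_list[i] | flat_list[j])))
--
--     return flats
-- ===== SOURCE B (Python) =====
-- class _UF:
--     """Union-find; same data layout as the textbook structure."""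
--     def __init__(self, n):
--         self.parent = list(range(n))
--         self.sz = [1] * n
--         self.num_components = n
--
--     def find(self, x):
--         while self.parent[x] != x:
--             self.parent[x] = self.parent[self.parent[x]]
--             x = self.parent[x]
--         return x
--
--     def union(self, a, b):
--         a, b = self.find(a), self.find(b)
--         if a == b:
--             return False
--         if self.sz[a] < self.sz[b]:
--             a, b = b, a
--         self.parent[b] = a
--         self.sz[a] += self.sz[b]
--         self.num_components -= 1
--         return True
--
--     def connected(self, a, b):
--         return self.find(a) == self.find(b)
--
--
-- def _lattice_of_flats(edges, n_sub):
--     """Lattice of flats of the graphic matroid, one union-find per closure.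
--
--     cl(S) = S plus every edge whose two endpoints are already connected by
--     S: adding such an edge never changes the components, so a single pass
--     of connectivity tests computes the closure (no rank recomputation and
--     no stabilisation loop are needed).
--     """
--     m = len(edges)
--
--     def closure(S):
--         uf = _UF(n_sub)
--         for i in set(S):
--             u, v = edges[i]
--             uf.union(u, v)
--         cl = set(S)
--         for e in range(m):
--             if e not in cl:
--                 u, v = edges[e]
--                 if uf.connected(u, v):
--                     cl.add(e)
--         return frozenset(cl)
--
--     flats = set()
--     flats.add(closure([]))
--     for e in range(m):
--         flats.add(closure([e]))
--     for e1 in range(m):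
--         for e2 in range(e1 + 1, m):
--             flats.add(closure([e1, e2]))
--     flats.add(frozenset(range(m)))
--     flat_list = list(flats)
--     for i in range(len(flat_list)):
--         for j in range(i + 1, len(flat_list)):
--             flats.add(closure(list(flat_list[i] | flat_list[j])))
--     return flats
-- ===== Notes on version B (the rewrite author's own statement) =====
-- stated objective: faster
-- what changed: closure(S) builds one union-find for S and keeps every edge whose endpoints that union-find already connects (one connectivity test per edge, no stabilisation loop), instead of recomputing the matroid rank from scratch for every candidate edge and iterating until stable.
import Mathlib
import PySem

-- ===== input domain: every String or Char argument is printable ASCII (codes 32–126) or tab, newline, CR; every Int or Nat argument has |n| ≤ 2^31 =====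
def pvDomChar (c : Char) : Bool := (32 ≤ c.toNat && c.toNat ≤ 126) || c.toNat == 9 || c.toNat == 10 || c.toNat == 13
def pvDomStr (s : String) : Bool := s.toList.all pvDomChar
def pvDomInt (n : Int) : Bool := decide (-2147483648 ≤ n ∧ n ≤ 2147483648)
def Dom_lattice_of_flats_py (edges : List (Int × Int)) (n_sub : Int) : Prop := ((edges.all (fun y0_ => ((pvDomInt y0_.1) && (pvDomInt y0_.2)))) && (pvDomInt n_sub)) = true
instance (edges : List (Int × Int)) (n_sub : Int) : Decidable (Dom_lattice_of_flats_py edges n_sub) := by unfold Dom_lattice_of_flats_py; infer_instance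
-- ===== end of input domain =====

-- B replaces A's per-candidate-edge rank recomputations and stabilisation loop by ONE
-- union-find per closure and a connectivity test per edge (objective: faster).
-- Both Pythons return a set of frozensets; the ports return it as a list of lists in
-- insertion order (compared as a set of sets, per the type convention).

-- ===== PORT A =====
-- union-find helpers: transliteration of the Python class `_UnionFind` (A) = `_UF` (B);
-- the class code is identical in Source A and Source B, so A's and B's ports share these defs.
structure PvUF where
  parent : List Int
  sz : List Int
  nc : Int

-- `while self.parent[x] != x: parent[x] = parent[parent[x]]; x = parent[x]` — ported
-- with fuel = len(parent) (the chase visits distinct nodes, so this fuel is never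
-- exhausted on states the ports build; proved in pvFindAux_ok below).
def pvFindAux : Nat → List Int → Int → List Int × Int
  | 0, p, x => (p, x)
  | k+1, p, x =>
      if PySem.List.pyGetD p x 0 = x then (p, x)
      else
        pvFindAux k
          (PySem.List.pySetD p x (PySem.List.pyGetD p (PySem.List.pyGetD p x 0) 0))
          (PySem.List.pyGetD p (PySem.List.pyGetD p x 0) 0)

def pvFind (p : List Int) (x : Int) : List Int × Int := pvFindAux p.length p x

def pvUnion (uf : PvUF) (a b : Int) : PvUF × Bool :=
  let fa := pvFind uf.parent a
  let fb := pvFind fa.1 b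
  if fa.2 = fb.2 then (⟨fb.1, uf.sz, uf.nc⟩, false)
  else
    let w := if PySem.List.pyGetD uf.sz fa.2 0 < PySem.List.pyGetD uf.sz fb.2 0 then fb.2 else fa.2
    let l := if PySem.List.pyGetD uf.sz fa.2 0 < PySem.List.pyGetD uf.sz fb.2 0 then fa.2 else fb.2
    (⟨PySem.List.pySetD fb.1 l w,
      PySem.List.pySetD uf.sz w (PySem.List.pyGetD uf.sz w 0 + PySem.List.pyGetD uf.sz l 0),
      uf.nc - 1⟩, true)

def pvInit (n : Int) : PvUF :=
  ⟨(List.range n.toNat).map Int.ofNat, List.replicate n.toNat 1, n⟩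

-- one step of `_matroid_rank`'s loop: u, v = edges[idx]; if uf.union(u, v): rank += 1
def pvStep (edges : List (Int × Int)) (st : PvUF × Int) (idx : Int) : PvUF × Int :=
  let e := PySem.List.pyGetD edges idx ((0 : Int), (0 : Int))
  let r := pvUnion st.1 e.1 e.2
  (r.1, if r.2 then st.2 + 1 else st.2)

def pvRun (edges : List (Int × Int)) (n : Int) (L : List Int) : PvUF × Int :=
  L.foldl (pvStep edges) (pvInit n, 0)

def pvRank (edges : List (Int × Int)) (n : Int) (L : List Int) : Int :=
  (pvRun edges n L).2

def pvIdxs (m : Nat) : List Int := (List.range m).map Int.ofNat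

-- first pass of A's closure: `if e not in cl and rank(cl|{e}) == r_S: cl.add(e)`
def pvStepA (edges : List (Int × Int)) (n rS : Int) (cl : List Int) (e : Int) : List Int :=
  if cl.contains e then cl
  else if pvRank edges n (cl ++ [e]) = rS then cl ++ [e] else cl

-- one round of A's `while changed` loop body (r_cl fixed at the top of the round)
def pvStepS (edges : List (Int × Int)) (n rcl : Int) (st : List Int × Bool) (e : Int) : List Int × Bool :=
  if st.1.contains e then st
  else if pvRank edges n (st.1 ++ [e]) = rcl then (st.1 ++ [e], true) else st

def pvStabilize (edges : List (Int × Int)) (n : Int) (m : Nat) : Nat → List Int → List Int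
  | 0, cl => cl
  | k+1, cl =>
      let rcl := pvRank edges n cl
      let r := (pvIdxs m).foldl (pvStepS edges n rcl) (cl, false)
      if r.2 then pvStabilize edges n m k r.1 else r.1

def pvClosureA (edges : List (Int × Int)) (n : Int) (S : List Int) : List Int :=
  let m := edges.length
  let Sset := PySem.Set.ofList S
  let rS := pvRank edges n Sset
  let cl := (pvIdxs m).foldl (pvStepA edges n rS) Sset
  pvStabilize edges n m (m+1) cl

-- Python `flats.add(frozenset c)`: sets of frozensets — membership is set-equality
def pvAddFlat (fs : List (List Int)) (c : List Int) : List (List Int) :=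
  if fs.any (fun f => PySem.Set.equal f c) then fs else fs ++ [c]

-- the flats enumeration (textually identical in Source A and Source B, so shared):
-- closure([]), closure([e]), closure([e1,e2]), the full ground set, then one round
-- of closures of pairwise joins of the flats found so far.
def pvAssemble (cls : List Int → List Int) (m : Nat) : List (List Int) :=
  let f0 := pvAddFlat [] (cls [])
  let f1 := (pvIdxs m).foldl (fun fs e => pvAddFlat fs (cls [e])) f0
  let f2 := (pvIdxs m).foldl (fun fs e1 =>
      ((pvIdxs m).filter (fun e2 => e1 < e2)).foldl
        (fun fs2 e2 => pvAddFlat fs2 (cls [e1, e2])) fs) f1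
  let f3 := pvAddFlat f2 (pvIdxs m)
  (List.range f3.length).foldl (fun fs i =>
      ((List.range f3.length).filter (fun j => i < j)).foldl
        (fun fs2 j => pvAddFlat fs2 (cls (PySem.Set.union (f3.getD i []) (f3.getD j [])))) fs) f3

def lattice_of_flats_py (edges : List (Int × Int)) (n_sub : Int) : List (List Int) :=
  pvAssemble (pvClosureA edges n_sub) edges.length

-- ===== PORT B =====
-- B's closure: build ONE union-find from S, then `for e: if uf.connected(u, v): cl.add(e)`

def pvBuildUF (edges : List (Int × Int)) (n : Int) (S : List Int) : PvUF :=
  S.foldl (fun uf i =>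
    let e := PySem.List.pyGetD edges i ((0 : Int), (0 : Int))
    (pvUnion uf e.1 e.2).1) (pvInit n)

-- `uf.connected(u, v)` calls find twice (path-compressing the parent list)
def pvStepB (edges : List (Int × Int)) (st : PvUF × List Int) (e : Int) : PvUF × List Int :=
  if st.2.contains e then st
  else
    let ed := PySem.List.pyGetD edges e ((0 : Int), (0 : Int))
    let fu := pvFind st.1.parent ed.1
    let fv := pvFind fu.1 ed.2
    (⟨fv.1, st.1.sz, st.1.nc⟩, if fu.2 = fv.2 then st.2 ++ [e] else st.2)

def pvClosureB (edges : List (Int × Int)) (n : Int) (S : List Int) : List Int :=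
  let m := edges.length
  let Sset := PySem.Set.ofList S
  let uf0 := pvBuildUF edges n Sset
  ((pvIdxs m).foldl (pvStepB edges) (uf0, Sset)).2

def lattice_of_flats_py_alt (edges : List (Int × Int)) (n_sub : Int) : List (List Int) :=
  pvAssemble (pvClosureB edges n_sub) edges.length

-- ===== PRECONDITION & SPEC =====
-- Pre_ excludes exactly the inputs on which A raises IndexError: an edge endpoint u
-- with u < -n_sub or u ≥ n_sub is used as an index into the length-n_sub parent list.
-- (Endpoints in [-n_sub, 0) are kept: Python's negative-index wraparound returns a value,
-- and B does the same.)
def Pre_lattice_of_flats_py (edges : List (Int × Int)) (n_sub : Int) : Prop :=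
  ∀ e ∈ edges, -n_sub ≤ e.1 ∧ e.1 < n_sub ∧ -n_sub ≤ e.2 ∧ e.2 < n_sub

instance (edges : List (Int × Int)) (n_sub : Int) : Decidable (Pre_lattice_of_flats_py edges n_sub) := by
  unfold Pre_lattice_of_flats_py; infer_instance

def pvWitness_lattice_of_flats_py : (List (Int × Int)) × Int := ([(0, 1), (1, 2), (0, 2), (3, 3)], 4)

def Spec_lattice_of_flats_py (edges : List (Int × Int)) (n_sub : Int) (out : List (List Int)) : Prop :=
  out = lattice_of_flats_py_alt edges n_sub

instance (edges : List (Int × Int)) (n_sub : Int) (out : List (List Int)) : Decidable (Spec_lattice_of_flats_py edges n_sub out) := by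
  unfold Spec_lattice_of_flats_py; infer_instance

-- ===== CLAIM (what is proved, stated in full; the proofs are below) =====
def Claim_equal_lattice_of_flats_py : Prop := ∀ (edges : List (Int × Int)) (n_sub : Int), Dom_lattice_of_flats_py edges n_sub → Pre_lattice_of_flats_py edges n_sub → Spec_lattice_of_flats_py edges n_sub (lattice_of_flats_py edges n_sub)

-- ===== LEMMAS AND PROOFS =====
-- ---------- abstract pointer-forest theory ----------

-- the parent list as a function ℕ → ℕ (out-of-range reads give 0)
def pvFOf (p : List Int) (j : ℕ) : ℕ := (p.getD j 0).toNat

-- Python's negative-index wraparound, normalised to a Nat index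
def pvNidx (n : ℕ) (x : Int) : ℕ := (if x < 0 then x + n else x).toNat

-- every node reaches a fixpoint of f by iterating
def pvRooted (f : ℕ → ℕ) : Prop := ∀ i, ∃ k, f^[k+1] i = f^[k] i

def pvD (f : ℕ → ℕ) (h : pvRooted f) (i : ℕ) : ℕ :=
  @Nat.find (fun k => f^[k+1] i = f^[k] i) (fun _ => Nat.decEq _ _) (h i)

def pvRoot (f : ℕ → ℕ) (h : pvRooted f) (i : ℕ) : ℕ := f^[pvD f h i] i

lemma pvD_spec (f : ℕ → ℕ) (h : pvRooted f) (i : ℕ) :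
    f^[pvD f h i + 1] i = f^[pvD f h i] i :=
  @Nat.find_spec (fun k => f^[k+1] i = f^[k] i) (fun _ => Nat.decEq _ _) (h i)

lemma pvRoot_fix (f : ℕ → ℕ) (h : pvRooted f) (i : ℕ) :
    f (pvRoot f h i) = pvRoot f h i := by
  have := pvD_spec f h i
  rwa [Function.iterate_succ_apply'] at this

lemma pvIter_fix_of (f : ℕ → ℕ) (i a : ℕ) (hfix : f (f^[a] i) = f^[a] i) :
    ∀ k, a ≤ k → f^[k] i = f^[a] i := by
  intro k hk
  obtain ⟨t, rfl⟩ := Nat.exists_eq_add_of_le hk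
  clear hk
  induction t with
  | zero => rfl
  | succ t ih =>
      have h1 : a + (t+1) = (a + t) + 1 := by omega
      rw [h1, Function.iterate_succ_apply', ih, hfix]

lemma pvIter_ge_root (f : ℕ → ℕ) (h : pvRooted f) (i k : ℕ) (hk : pvD f h i ≤ k) :
    f^[k] i = pvRoot f h i :=
  pvIter_fix_of f i (pvD f h i) (pvRoot_fix f h i) k hk

lemma pvD_eq_zero (f : ℕ → ℕ) (h : pvRooted f) (i : ℕ) (hfix : f i = i) :
    pvD f h i = 0 := by
  have h0 : f^[0+1] i = f^[0] i := by simpa using hfix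
  exact Nat.eq_zero_of_le_zero
    (@Nat.find_le 0 (fun k => f^[k+1] i = f^[k] i) (fun _ => Nat.decEq _ _) (h i) h0)

lemma pvRoot_eq_self (f : ℕ → ℕ) (h : pvRooted f) (i : ℕ) (hfix : f i = i) :
    pvRoot f h i = i := by
  unfold pvRoot
  rw [pvD_eq_zero f h i hfix]
  rfl

lemma pvD_succ (f : ℕ → ℕ) (h : pvRooted f) (i : ℕ) (hne : f i ≠ i) :
    pvD f h i = pvD f h (f i) + 1 := by
  have h1 : pvD f h i ≤ pvD f h (f i) + 1 := by
    apply @Nat.find_le _ (fun k => f^[k+1] i = f^[k] i) (fun _ => Nat.decEq _ _) (h i)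
    rw [Function.iterate_succ_apply, Function.iterate_succ_apply]
    exact pvD_spec f h (f i)
  have hpos : 1 ≤ pvD f h i := by
    rcases Nat.eq_zero_or_pos (pvD f h i) with h0 | h0
    · exfalso
      have := pvD_spec f h i
      rw [h0] at this
      simp at this
      exact hne this
    · exact h0
  have h2 : pvD f h (f i) ≤ pvD f h i - 1 := by
    apply @Nat.find_le _ (fun k => f^[k+1] (f i) = f^[k] (f i)) (fun _ => Nat.decEq _ _) (h (f i))
    have : (pvD f h i - 1 + 1) + 1 = pvD f h i + 1 := by omega
    rw [← Function.iterate_succ_apply, ← Function.iterate_succ_apply]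
    calc f^[pvD f h i - 1 + 1 + 1] i = f^[pvD f h i + 1] i := by rw [this]
      _ = f^[pvD f h i] i := pvD_spec f h i
      _ = f^[pvD f h i - 1 + 1] i := by congr 1; omega
  omega

lemma pvRoot_step (f : ℕ → ℕ) (h : pvRooted f) (i : ℕ) :
    pvRoot f h (f i) = pvRoot f h i := by
  by_cases hfix : f i = i
  · rw [hfix]
  · unfold pvRoot
    rw [pvD_succ f h i hfix, Function.iterate_succ_apply]

lemma pvNo_two_cycle (f : ℕ → ℕ) (h : pvRooted f) (i : ℕ) (hff : f (f i) = i) :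
    f i = i := by
  by_contra hne
  have h1 := pvD_succ f h i hne
  have hne2 : f (f i) ≠ f i := by
    rw [hff]; exact fun e => hne e.symm
  have h2 := pvD_succ f h (f i) hne2
  rw [hff] at h2
  omega

-- ---------- shortcut (path compression) lemmas ----------

lemma pvShortcut_reaches (f f' : ℕ → ℕ) (h : pvRooted f)
    (hs : ∀ j, f' j = f j ∨ f' j = f (f j)) :
    ∀ i, ∃ k, f'^[k] i = pvRoot f h i := by
  intro i
  induction hd : pvD f h i using Nat.strong_induction_on generalizing i with
  | _ d ih =>
    by_cases hfix : f i = i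
    · exact ⟨0, (pvRoot_eq_self f h i hfix).symm⟩
    · have hlt : pvD f h (f' i) < d := by
        rcases hs i with h1 | h1
        · rw [h1, ← hd, pvD_succ f h i hfix]; omega
        · rw [h1]
          by_cases hfix2 : f (f i) = f i
          · rw [hfix2, pvD_eq_zero f h _ hfix2, ← hd, pvD_succ f h i hfix]; omega
          · rw [← hd, pvD_succ f h i hfix, pvD_succ f h (f i) hfix2]; omega
      obtain ⟨k, hk⟩ := ih _ hlt (f' i) rfl
      refine ⟨k + 1, ?_⟩
      rw [Function.iterate_succ_apply, hk]
      rcases hs i with h1 | h1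
      · rw [h1] at hk ⊢
        rw [pvRoot_step f h i]
      · rw [h1] at hk ⊢
        rw [pvRoot_step f h (f i), pvRoot_step f h i]

lemma pvShortcut_root_fix (f f' : ℕ → ℕ) (h : pvRooted f)
    (hs : ∀ j, f' j = f j ∨ f' j = f (f j)) (i : ℕ) :
    f' (pvRoot f h i) = pvRoot f h i := by
  rcases hs (pvRoot f h i) with h1 | h1
  · rw [h1, pvRoot_fix f h i]
  · rw [h1, pvRoot_fix f h i, pvRoot_fix f h i]

lemma pvShortcut_rooted (f f' : ℕ → ℕ) (h : pvRooted f)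
    (hs : ∀ j, f' j = f j ∨ f' j = f (f j)) : pvRooted f' := by
  intro i
  obtain ⟨k, hk⟩ := pvShortcut_reaches f f' h hs i
  refine ⟨k, ?_⟩
  rw [Function.iterate_succ_apply', hk, pvShortcut_root_fix f f' h hs i]

lemma pvShortcut_root_eq (f f' : ℕ → ℕ) (h : pvRooted f) (h' : pvRooted f')
    (hs : ∀ j, f' j = f j ∨ f' j = f (f j)) (i : ℕ) :
    pvRoot f' h' i = pvRoot f h i := by
  obtain ⟨k, hk⟩ := pvShortcut_reaches f f' h hs i
  have hfixi : f' (pvRoot f h i) = pvRoot f h i := pvShortcut_root_fix f f' h hs i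
  have hfix2 : f' (f'^[k] i) = f'^[k] i := by rw [hk]; exact hfixi
  have h1 : f'^[max k (pvD f' h' i)] i = f'^[k] i :=
    pvIter_fix_of f' i k hfix2 _ (le_max_left _ _)
  have h2 : f'^[max k (pvD f' h' i)] i = pvRoot f' h' i :=
    pvIter_ge_root f' h' i _ (le_max_right _ _)
  rw [← h2, h1, hk]

lemma pvShortcut_d_le (f f' : ℕ → ℕ) (h : pvRooted f) (h' : pvRooted f')
    (hs : ∀ j, f' j = f j ∨ f' j = f (f j)) (i : ℕ) :
    pvD f' h' i ≤ pvD f h i := by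
  induction hd : pvD f h i using Nat.strong_induction_on generalizing i with
  | _ d ih =>
    by_cases hfix : f i = i
    · have : f' i = i := by rcases hs i with h1 | h1 <;> rw [h1, hfix] <;> try rw [hfix]
      rw [pvD_eq_zero f' h' i this]; omega
    · have hne' : f' i ≠ i := by
        rcases hs i with h1 | h1
        · rw [h1]; exact hfix
        · rw [h1]
          intro hcontra
          exact hfix (pvNo_two_cycle f h i hcontra)
      have hlt : pvD f h (f' i) < d := by
        rcases hs i with h1 | h1
        · rw [h1, ← hd, pvD_succ f h i hfix]; omega
        · rw [h1]
          by_cases hfix2 : f (f i) = f i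
          · rw [hfix2, pvD_eq_zero f h _ hfix2, ← hd, pvD_succ f h i hfix]; omega
          · rw [← hd, pvD_succ f h i hfix, pvD_succ f h (f i) hfix2]; omega
      have := ih _ hlt (f' i) rfl
      rw [pvD_succ f' h' i hne']
      omega

-- ---------- link (union of two roots) lemma ----------

lemma pvLink_rooted (f : ℕ → ℕ) (h : pvRooted f) (l w : ℕ) (hl : f l = l)
    (hw : f w = w) (hlw : l ≠ w) :
    pvRooted (Function.update f l w) := by
  intro i
  set f' := Function.update f l w with hf'
  induction hd : pvD f h i using Nat.strong_induction_on generalizing i with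
  | _ d ih =>
    by_cases hfix : f i = i
    · by_cases hil : i = l
      · -- f' i = w, and w ≠ l is an f'-fixpoint
        refine ⟨1, ?_⟩
        have h1 : f' i = w := by rw [hf', hil, Function.update_self]
        have h2 : f' w = w := by rw [hf', Function.update_of_ne (fun e => hlw e.symm), hw]
        simp [h1, h2]
      · refine ⟨0, ?_⟩
        simp [hf', Function.update_of_ne hil, hfix]
    · have hil : i ≠ l := fun e => hfix (e ▸ hl)
      have h1 : f' i = f i := by rw [hf', Function.update_of_ne hil]
      have hlt : pvD f h (f i) < d := by rw [← hd, pvD_succ f h i hfix]; omega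
      obtain ⟨k, hk⟩ := ih _ hlt (f i) rfl
      refine ⟨k + 1, ?_⟩
      rw [Function.iterate_succ_apply f' (k+1) i, Function.iterate_succ_apply f' k i, h1, hk]

lemma pvLink_root_eq (f : ℕ → ℕ) (h : pvRooted f) (l w : ℕ) (hl : f l = l)
    (hw : f w = w) (hlw : l ≠ w) (h' : pvRooted (Function.update f l w)) (i : ℕ) :
    pvRoot (Function.update f l w) h' i
      = if pvRoot f h i = l then w else pvRoot f h i := by
  set f' := Function.update f l w with hf'
  induction hd : pvD f h i using Nat.strong_induction_on generalizing i with
  | _ d ih =>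
    by_cases hfix : f i = i
    · rw [pvRoot_eq_self f h i hfix]
      by_cases hil : i = l
      · subst hil
        have h1 : f' i = w := by rw [hf', Function.update_self]
        have h2 : pvRoot f' h' i = pvRoot f' h' w := by rw [← h1, pvRoot_step]
        have h3 : f' w = w := by rw [hf', Function.update_of_ne (fun e => hlw e.symm), hw]
        rw [h2, pvRoot_eq_self f' h' w h3]
        exact (if_pos rfl).symm
      · simp only [if_neg hil]
        have h1 : f' i = i := by rw [hf', Function.update_of_ne hil, hfix]
        exact pvRoot_eq_self f' h' i h1
    · have hil : i ≠ l := fun e => hfix (e ▸ hl)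
      have h1 : f' i = f i := by rw [hf', Function.update_of_ne hil]
      have hlt : pvD f h (f i) < d := by rw [← hd, pvD_succ f h i hfix]; omega
      have hih := ih _ hlt (f i) rfl
      have hstep : pvRoot f' h' i = pvRoot f' h' (f i) := by
        rw [← h1]
        exact (pvRoot_step f' h' i).symm
      have hstep2 : pvRoot f h (f i) = pvRoot f h i := pvRoot_step f h i
      rw [hstep, hih, hstep2]

-- ---------- invariant, pigeonhole bound, Int bridges ----------

def pvInv (n : ℕ) (p : List Int) : Prop :=
  p.length = n ∧ (∀ j : ℕ, 0 ≤ p.getD j 0 ∧ (p.getD j 0).toNat < n) ∧ pvRooted (pvFOf p)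

lemma pvInv_pos {n : ℕ} {p : List Int} (h : pvInv n p) : 0 < n :=
  lt_of_le_of_lt (Nat.zero_le _) (h.2.1 0).2

lemma pvFOf_lt {n : ℕ} {p : List Int} (h : pvInv n p) (j : ℕ) : pvFOf p j < n :=
  (h.2.1 j).2

lemma pvIter_lt {n : ℕ} {p : List Int} (hInv : pvInv n p) (i : ℕ) (hi : i < n) :
    ∀ k, (pvFOf p)^[k] i < n := by
  intro k
  induction k with
  | zero => simpa
  | succ k ih => rw [Function.iterate_succ_apply']; exact pvFOf_lt hInv _

lemma pvRoot_lt {n : ℕ} {p : List Int} (hInv : pvInv n p) (h : pvRooted (pvFOf p))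
    (i : ℕ) (hi : i < n) : pvRoot (pvFOf p) h i < n :=
  pvIter_lt hInv i hi _

lemma pvNoRepeat (f : ℕ → ℕ) (h : pvRooted f) (i a b : ℕ) (hab : a < b)
    (hbd : b ≤ pvD f h i) (heq : f^[a] i = f^[b] i) : False := by
  have hshift : ∀ s, f^[a + s + (b-a)] i = f^[a + s] i := by
    intro s
    induction s with
    | zero =>
        have e : a + 0 + (b - a) = b := by omega
        rw [e]
        simpa using heq.symm
    | succ s ih =>
        have e1 : a + (s+1) + (b-a) = (a + s + (b-a)) + 1 := by omega
        have e2 : a + (s+1) = (a + s) + 1 := by omega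
        rw [e1, Function.iterate_succ_apply', ih, e2, Function.iterate_succ_apply']
  have h1 : f^[(pvD f h i - (b-a)) + (b-a)] i = f^[pvD f h i - (b-a)] i := by
    have := hshift (pvD f h i - (b-a) - a)
    have e : a + (pvD f h i - (b-a) - a) = pvD f h i - (b-a) := by omega
    rwa [e] at this
  have h2 : f^[(pvD f h i - (b-a)) + 1 + (b-a)] i = f^[(pvD f h i - (b-a)) + 1] i := by
    have := hshift (pvD f h i - (b-a) + 1 - a)
    have e : a + (pvD f h i - (b-a) + 1 - a) = pvD f h i - (b-a) + 1 := by omega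
    rwa [e] at this
  have e2 : (pvD f h i - (b - a)) + (b - a) = pvD f h i := by omega
  have e3 : (pvD f h i - (b - a)) + 1 + (b-a) = pvD f h i + 1 := by omega
  have hfixc : f^[(pvD f h i - (b-a)) + 1] i = f^[pvD f h i - (b-a)] i := by
    rw [← h2, ← h1, e2, e3]
    exact pvD_spec f h i
  exact @Nat.find_min (fun k => f^[k+1] i = f^[k] i) (fun _ => Nat.decEq _ _) (h i)
    (pvD f h i - (b-a)) (by omega : pvD f h i - (b-a) < pvD f h i) hfixc

lemma pvD_add_one_le {n : ℕ} {p : List Int} (hInv : pvInv n p) (h : pvRooted (pvFOf p))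
    (i : ℕ) (hi : i < n) : pvD (pvFOf p) h i + 1 ≤ n := by
  by_contra hcon
  have hdn : n ≤ pvD (pvFOf p) h i := by omega
  have hmaps : ∀ k ∈ Finset.range (n+1), (pvFOf p)^[k] i ∈ Finset.range n := by
    intro k _
    exact Finset.mem_range.mpr (pvIter_lt hInv i hi k)
  have hcard : (Finset.range n).card < (Finset.range (n+1)).card := by simp
  obtain ⟨a, ha, b, hb, hab, heq⟩ := Finset.exists_ne_map_eq_of_card_lt_of_maps_to hcard hmaps
  have ha' : a ≤ n := by have := Finset.mem_range.mp ha; omega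
  have hb' : b ≤ n := by have := Finset.mem_range.mp hb; omega
  rcases lt_trichotomy a b with hlt | heqab | hgt
  · exact pvNoRepeat (pvFOf p) h i a b hlt (by omega) heq
  · exact hab heqab
  · exact pvNoRepeat (pvFOf p) h i b a hgt (by omega) heq.symm

-- normalised index facts
lemma pvNidx_lt {n : ℕ} {x : Int} (h1 : -(n:ℤ) ≤ x) (h2 : x < (n:ℤ)) : pvNidx n x < n := by
  unfold pvNidx
  split_ifs with hx
  all_goals omega

lemma pvNidx_natCast {n : ℕ} (j : ℕ) : pvNidx n (j : ℤ) = j := by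
  unfold pvNidx
  rw [if_neg (by omega)]
  omega

lemma pvNidx_of_nonneg {n : ℕ} {x : Int} (hx : 0 ≤ x) : pvNidx n x = x.toNat := by
  unfold pvNidx
  rw [if_neg (by omega)]

-- pyGetD on an invariant parent list reads the abstract function
lemma pvGetD_nidx {n : ℕ} {p : List Int} (hInv : pvInv n p) {x : Int}
    (h1 : -(n:ℤ) ≤ x) (h2 : x < (n:ℤ)) :
    PySem.List.pyGetD p x 0 = ((pvFOf p (pvNidx n x) : ℕ) : ℤ) := by
  have hlen : p.length = n := hInv.1
  have hxl : pvNidx n x < p.length := by rw [hlen]; exact pvNidx_lt h1 h2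
  have hnn : 0 ≤ p[pvNidx n x] := by
    have := (hInv.2.1 (pvNidx n x)).1
    rwa [List.getD_eq_getElem p 0 hxl] at this
  have hval : ((pvFOf p (pvNidx n x) : ℕ) : ℤ) = p[pvNidx n x] := by
    unfold pvFOf
    rw [List.getD_eq_getElem p 0 hxl, Int.toNat_of_nonneg hnn]
  by_cases hx : (0:ℤ) ≤ x
  · rw [PySem.List.pyGetD_eq_getElem p 0 hx (by omega), hval]
    congr 1
    rw [pvNidx_of_nonneg hx]
  · have hx' : x < 0 := by omega
    have hk : x = -((((-x).toNat : ℕ)) : ℤ) := by omega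
    have hk0 : 0 < (-x).toNat := by omega
    have hkl : (-x).toNat ≤ p.length := by omega
    have hneg : PySem.List.pyGetD p x 0 = p[p.length - (-x).toNat] := by
      conv_lhs => rw [hk]
      exact PySem.List.pyGetD_neg_natCast p (-x).toNat 0 hk0 (by omega)
    have hidx : pvNidx n x = p.length - (-x).toNat := by
      unfold pvNidx
      rw [if_pos hx']
      omega
    rw [hneg, hval]
    simp only [hidx]


-- pySetD with a (possibly negative) in-range index
lemma pvSetD_nidx {n : ℕ} {p : List Int} (hlen : p.length = n) {x : Int}
    (h1 : -(n:ℤ) ≤ x) (h2 : x < (n:ℤ)) (v : Int) :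
    PySem.List.pySetD p x v = p.set (pvNidx n x) v := by
  by_cases hx : (0:ℤ) ≤ x
  · rw [PySem.List.pySetD_of_nonneg p v hx, pvNidx_of_nonneg hx]
  · simp only [PySem.List.pySetD, PySem.List.pySet?, PySem.List.pyIdx?, hlen]
    have hx' : x < 0 := by omega
    rw [if_neg (by omega), if_pos (by omega)]
    simp only [Option.map_some, Option.getD_some]
    congr 1
    unfold pvNidx
    rw [if_pos hx']
    omega

lemma pvFOf_set (p : List Int) (j : ℕ) (hj : j < p.length) (v : ℕ) :
    pvFOf (p.set j ((v : ℕ) : ℤ)) = Function.update (pvFOf p) j v := by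
  funext k
  unfold pvFOf
  by_cases hkj : k = j
  · subst hkj
    rw [Function.update_self, List.getD_eq_getElem _ 0 (by simpa using hj),
      List.getElem_set_self]
    omega
  · rw [Function.update_of_ne hkj]
    rw [List.getD_eq_getElem?_getD, List.getD_eq_getElem?_getD,
      List.getElem?_set_ne (fun e => hkj e.symm)]

lemma pvInv_set {n : ℕ} {p : List Int} (hInv : pvInv n p) (j v : ℕ) (hv : v < n)
    (hrooted : pvRooted (pvFOf (p.set j ((v : ℕ) : ℤ)))) :
    pvInv n (p.set j ((v : ℕ) : ℤ)) := by
  refine ⟨by rw [List.length_set]; exact hInv.1, ?_, hrooted⟩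
  intro k
  by_cases hkj : k = j
  · subst hkj
    by_cases hkl : k < p.length
    · rw [List.getD_eq_getElem _ 0 (by simpa using hkl), List.getElem_set_self]
      constructor
      · omega
      · omega
    · rw [List.getD_eq_getElem?_getD, List.getElem?_eq_none (by simpa using hkl)]
      simpa using pvInv_pos hInv
  · rw [List.getD_eq_getElem?_getD, List.getElem?_set_ne (fun e => hkj e.symm),
      ← List.getD_eq_getElem?_getD]
    exact hInv.2.1 k

-- ---------- find and union against the abstract forest ----------

lemma pvRoot_is_fix {f : ℕ → ℕ} {h : pvRooted f} {i : ℕ} (hr : pvRoot f h i = i) :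
    f i = i := by
  have := pvRoot_fix f h i
  rw [hr] at this
  exact this

lemma pvFindAux_stay {n : ℕ} (k : ℕ) (p : List Int) (j : ℕ) (hInv : pvInv n p)
    (hjn : j < n) (hfix : pvFOf p j = j) :
    pvFindAux k p ((j : ℕ) : ℤ) = (p, ((j : ℕ) : ℤ)) := by
  cases k with
  | zero => rfl
  | succ k =>
      have hget : PySem.List.pyGetD p ((j:ℕ):ℤ) 0 = ((pvFOf p (pvNidx n ((j:ℕ):ℤ)) : ℕ) : ℤ) :=
        pvGetD_nidx hInv (by omega) (by omega)
      rw [pvNidx_natCast] at hget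
      simp only [pvFindAux]
      rw [hget, hfix, if_pos rfl]

lemma pvFindAux_ok {n : ℕ} :
    ∀ (D fuel : ℕ) (p : List Int) (x : Int) (hInv : pvInv n p)
      (hx1 : -(n:ℤ) ≤ x) (hx2 : x < (n:ℤ))
      (hD : pvD (pvFOf p) hInv.2.2 (pvNidx n x) = D)
      (hfuel : D + 1 ≤ fuel),
      ∃ (q : List Int) (hq : pvInv n q),
        pvFindAux fuel p x = (q, ((pvRoot (pvFOf p) hInv.2.2 (pvNidx n x) : ℕ) : ℤ))
        ∧ (∀ i, pvRoot (pvFOf q) hq.2.2 i = pvRoot (pvFOf p) hInv.2.2 i)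
        ∧ (∀ i, pvD (pvFOf q) hq.2.2 i ≤ pvD (pvFOf p) hInv.2.2 i) := by
  intro D
  induction D using Nat.strong_induction_on with
  | _ D ih =>
    intro fuel p x hInv hx1 hx2 hD hfuel
    obtain ⟨k, rfl⟩ : ∃ k, fuel = k + 1 := ⟨fuel - 1, by omega⟩
    have hroots : pvRooted (pvFOf p) := hInv.2.2
    have hxhn : pvNidx n x < n := pvNidx_lt hx1 hx2
    have hget : PySem.List.pyGetD p x 0 = ((pvFOf p (pvNidx n x) : ℕ) : ℤ) :=
      pvGetD_nidx hInv hx1 hx2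
    simp only [pvFindAux]
    rw [hget]
    by_cases hpx : ((pvFOf p (pvNidx n x) : ℕ) : ℤ) = x
    · -- parent[x] == x : x is its own (non-negative) root
      have hx0 : (0:ℤ) ≤ x := hpx ▸ Int.natCast_nonneg _
      have hxt : pvNidx n x = x.toNat := pvNidx_of_nonneg hx0
      have hfix : pvFOf p (pvNidx n x) = pvNidx n x := by omega
      rw [if_pos hpx]
      refine ⟨p, hInv, ?_, fun i => rfl, fun i => le_rfl⟩
      rw [pvRoot_eq_self _ hroots _ hfix]
      have : ((pvNidx n x : ℕ) : ℤ) = x := by omega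
      rw [this]
    · rw [if_neg hpx]
      have hfxn : pvFOf p (pvNidx n x) < n := pvFOf_lt hInv _
      have hget2 : PySem.List.pyGetD p ((pvFOf p (pvNidx n x) : ℕ) : ℤ) 0
          = ((pvFOf p (pvFOf p (pvNidx n x)) : ℕ) : ℤ) := by
        have h' := pvGetD_nidx hInv (x := ((pvFOf p (pvNidx n x) : ℕ) : ℤ))
          (by omega) (by omega)
        rwa [pvNidx_natCast] at h'
      rw [hget2]
      have hxhlen : pvNidx n x < p.length := by rw [hInv.1]; exact hxhn
      have hp'set : PySem.List.pySetD p x ((pvFOf p (pvFOf p (pvNidx n x)) : ℕ) : ℤ)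
          = p.set (pvNidx n x) ((pvFOf p (pvFOf p (pvNidx n x)) : ℕ) : ℤ) :=
        pvSetD_nidx hInv.1 hx1 hx2 _
      set p' := p.set (pvNidx n x) ((pvFOf p (pvFOf p (pvNidx n x)) : ℕ) : ℤ) with hp'def
      have hf' : pvFOf p' = Function.update (pvFOf p) (pvNidx n x)
          (pvFOf p (pvFOf p (pvNidx n x))) := pvFOf_set p _ hxhlen _
      have hs : ∀ j, pvFOf p' j = pvFOf p j ∨ pvFOf p' j = pvFOf p (pvFOf p j) := by
        intro j
        rw [hf']
        by_cases hj : j = pvNidx n x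
        · subst hj; right; rw [Function.update_self]
        · left; rw [Function.update_of_ne hj]
      have hrooted' : pvRooted (pvFOf p') := pvShortcut_rooted _ _ hroots hs
      have hInv' : pvInv n p' := pvInv_set hInv _ _ (pvFOf_lt hInv _) hrooted'
      have hrooteq : ∀ i, pvRoot (pvFOf p') hInv'.2.2 i = pvRoot (pvFOf p) hroots i :=
        fun i => pvShortcut_root_eq _ _ hroots hInv'.2.2 hs i
      have hdle : ∀ i, pvD (pvFOf p') hInv'.2.2 i ≤ pvD (pvFOf p) hroots i :=
        fun i => pvShortcut_d_le _ _ hroots hInv'.2.2 hs i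
      rw [hp'set]
      by_cases hfix : pvFOf p (pvNidx n x) = pvNidx n x
      · -- x was negative and already names its root: the write is a no-op step
        have hgg : pvFOf p (pvFOf p (pvNidx n x)) = pvNidx n x := by rw [hfix, hfix]
        rw [hgg]
        have hfix' : pvFOf p' (pvNidx n x) = pvNidx n x := by
          rw [hf', Function.update_self, hgg]
        have hstay := pvFindAux_stay (n := n) k p' (pvNidx n x) hInv' hxhn hfix'
        rw [hstay]
        refine ⟨p', hInv', ?_, hrooteq, hdle⟩
        rw [pvRoot_eq_self _ hroots _ hfix]
      · -- genuine chase step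
        have hD1 : pvD (pvFOf p) hroots (pvNidx n x)
            = pvD (pvFOf p) hroots (pvFOf p (pvNidx n x)) + 1 := pvD_succ _ hroots _ hfix
        have hdgp : pvD (pvFOf p) hroots (pvFOf p (pvFOf p (pvNidx n x))) + 1 ≤ D := by
          by_cases hfix2 : pvFOf p (pvFOf p (pvNidx n x)) = pvFOf p (pvNidx n x)
          · rw [hfix2]
            have h0 : pvD (pvFOf p) hroots (pvFOf p (pvNidx n x)) = 0 :=
              pvD_eq_zero _ hroots _ (by rw [hfix2])
            omega
          · have := pvD_succ _ hroots _ hfix2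
            omega
        have hdm : pvD (pvFOf p') hInv'.2.2 (pvFOf p (pvFOf p (pvNidx n x))) + 1 ≤ D :=
          le_trans (by have := hdle (pvFOf p (pvFOf p (pvNidx n x))); omega) hdgp
        have hmlt : pvD (pvFOf p') hInv'.2.2
            (pvNidx n ((pvFOf p (pvFOf p (pvNidx n x)) : ℕ) : ℤ)) < D := by
          rw [pvNidx_natCast]; omega
        obtain ⟨q, hq, hcalleq, hcallroot, hcalld⟩ :=
          ih _ hmlt k p' ((pvFOf p (pvFOf p (pvNidx n x)) : ℕ) : ℤ) hInv'
            (by omega) (by have := pvFOf_lt hInv (pvFOf p (pvNidx n x)); omega) rfl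
            (by rw [pvNidx_natCast] at *; omega)
        rw [hcalleq]
        have hrootgoal : pvRoot (pvFOf p') hInv'.2.2
            (pvNidx n ((pvFOf p (pvFOf p (pvNidx n x)) : ℕ) : ℤ))
            = pvRoot (pvFOf p) hroots (pvNidx n x) := by
          rw [pvNidx_natCast, hrooteq, pvRoot_step, pvRoot_step]
        refine ⟨q, hq, by rw [hrootgoal], ?_, ?_⟩
        · intro i; rw [hcallroot i, hrooteq i]
        · intro i; exact le_trans (hcalld i) (hdle i)

-- winner / loser of a merge, as the Python computes them from sz
def pvW (sz : List Int) (ra rb : ℕ) : ℕ :=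
  if PySem.List.pyGetD sz ((ra:ℕ):ℤ) 0 < PySem.List.pyGetD sz ((rb:ℕ):ℤ) 0 then rb else ra
def pvL (sz : List Int) (ra rb : ℕ) : ℕ :=
  if PySem.List.pyGetD sz ((ra:ℕ):ℤ) 0 < PySem.List.pyGetD sz ((rb:ℕ):ℤ) 0 then ra else rb

-- ---------- find/union/step specifications ----------

lemma pvRoot_idem (f : ℕ → ℕ) (h : pvRooted f) (i : ℕ) :
    pvRoot f h (pvRoot f h i) = pvRoot f h i :=
  pvRoot_eq_self f h _ (pvRoot_fix f h i)

lemma pvRoot_congr_fun {f g : ℕ → ℕ} (hfg : f = g) (hf : pvRooted f) (hg : pvRooted g)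
    (i : ℕ) : pvRoot f hf i = pvRoot g hg i := by
  subst hfg
  rfl

lemma pvFind_ok {n : ℕ} (p : List Int) (hInv : pvInv n p) (x : Int)
    (hx1 : -(n:ℤ) ≤ x) (hx2 : x < (n:ℤ)) :
    ∃ (q : List Int) (hq : pvInv n q),
      pvFind p x = (q, ((pvRoot (pvFOf p) hInv.2.2 (pvNidx n x) : ℕ) : ℤ))
      ∧ (∀ i, pvRoot (pvFOf q) hq.2.2 i = pvRoot (pvFOf p) hInv.2.2 i) := by
  obtain ⟨q, hq, h1, h2, _⟩ :=
    pvFindAux_ok (n := n) (pvD (pvFOf p) hInv.2.2 (pvNidx n x)) p.length p x hInv hx1 hx2 rfl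
      (le_trans (pvD_add_one_le hInv hInv.2.2 _ (pvNidx_lt hx1 hx2)) (le_of_eq hInv.1.symm))
  exact ⟨q, hq, h1, h2⟩

lemma pvUnion_same {n : ℕ} (uf : PvUF) (hInv : pvInv n uf.parent) {a b : Int}
    (ha1 : -(n:ℤ) ≤ a) (ha2 : a < (n:ℤ)) (hb1 : -(n:ℤ) ≤ b) (hb2 : b < (n:ℤ))
    (heq : pvRoot (pvFOf uf.parent) hInv.2.2 (pvNidx n a)
         = pvRoot (pvFOf uf.parent) hInv.2.2 (pvNidx n b)) :
    ∃ (q : List Int) (hq : pvInv n q),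
      pvUnion uf a b = (⟨q, uf.sz, uf.nc⟩, false)
      ∧ (∀ i, pvRoot (pvFOf q) hq.2.2 i = pvRoot (pvFOf uf.parent) hInv.2.2 i) := by
  obtain ⟨p1, h1, hfa, hr1⟩ := pvFind_ok uf.parent hInv a ha1 ha2
  obtain ⟨p2, h2, hfb, hr2⟩ := pvFind_ok p1 h1 b hb1 hb2
  refine ⟨p2, h2, ?_, fun i => (hr2 i).trans (hr1 i)⟩
  dsimp only [pvUnion]
  rw [hfa]
  dsimp only
  rw [hfb]
  dsimp only
  rw [hr1 (pvNidx n b), if_pos (by rw [heq])]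

lemma pvUnion_diff {n : ℕ} (uf : PvUF) (hInv : pvInv n uf.parent) {a b : Int}
    (ha1 : -(n:ℤ) ≤ a) (ha2 : a < (n:ℤ)) (hb1 : -(n:ℤ) ≤ b) (hb2 : b < (n:ℤ))
    (hne : pvRoot (pvFOf uf.parent) hInv.2.2 (pvNidx n a)
         ≠ pvRoot (pvFOf uf.parent) hInv.2.2 (pvNidx n b)) :
    ∃ (q : List Int) (hq : pvInv n q),
      pvUnion uf a b =
        (⟨q,
          PySem.List.pySetD uf.sz
            ((pvW uf.sz (pvRoot (pvFOf uf.parent) hInv.2.2 (pvNidx n a))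
                (pvRoot (pvFOf uf.parent) hInv.2.2 (pvNidx n b)) : ℕ) : ℤ)
            (PySem.List.pyGetD uf.sz
              ((pvW uf.sz (pvRoot (pvFOf uf.parent) hInv.2.2 (pvNidx n a))
                  (pvRoot (pvFOf uf.parent) hInv.2.2 (pvNidx n b)) : ℕ) : ℤ) 0
             + PySem.List.pyGetD uf.sz
              ((pvL uf.sz (pvRoot (pvFOf uf.parent) hInv.2.2 (pvNidx n a))
                  (pvRoot (pvFOf uf.parent) hInv.2.2 (pvNidx n b)) : ℕ) : ℤ) 0),
          uf.nc - 1⟩, true)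
      ∧ (∀ i, pvRoot (pvFOf q) hq.2.2 i =
          if pvRoot (pvFOf uf.parent) hInv.2.2 i
              = pvL uf.sz (pvRoot (pvFOf uf.parent) hInv.2.2 (pvNidx n a))
                  (pvRoot (pvFOf uf.parent) hInv.2.2 (pvNidx n b))
          then pvW uf.sz (pvRoot (pvFOf uf.parent) hInv.2.2 (pvNidx n a))
                  (pvRoot (pvFOf uf.parent) hInv.2.2 (pvNidx n b))
          else pvRoot (pvFOf uf.parent) hInv.2.2 i) := by
  set ra := pvRoot (pvFOf uf.parent) hInv.2.2 (pvNidx n a) with hra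
  set rb := pvRoot (pvFOf uf.parent) hInv.2.2 (pvNidx n b) with hrb
  obtain ⟨p1, h1, hfa, hr1⟩ := pvFind_ok uf.parent hInv a ha1 ha2
  obtain ⟨p2, h2, hfb, hr2⟩ := pvFind_ok p1 h1 b hb1 hb2
  have hran : ra < n := pvRoot_lt hInv hInv.2.2 _ (pvNidx_lt ha1 ha2)
  have hrbn : rb < n := pvRoot_lt hInv hInv.2.2 _ (pvNidx_lt hb1 hb2)
  set w := pvW uf.sz ra rb with hw
  set l := pvL uf.sz ra rb with hl
  have hwn : w < n := by rw [hw]; unfold pvW; split_ifs; exacts [hrbn, hran]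
  have hln : l < n := by rw [hl]; unfold pvL; split_ifs; exacts [hran, hrbn]
  have hlw : l ≠ w := by
    rw [hl, hw]; unfold pvL pvW; split_ifs
    exacts [hne, fun e => hne e.symm]
  -- l and w are fixpoints of (pvFOf p2)
  have hrootsp2 : ∀ i, pvRoot (pvFOf p2) h2.2.2 i = pvRoot (pvFOf uf.parent) hInv.2.2 i :=
    fun i => (hr2 i).trans (hr1 i)
  have hfixl : pvFOf p2 l = l := by
    apply pvRoot_is_fix (h := h2.2.2)
    rw [hrootsp2]
    have : pvRoot (pvFOf uf.parent) hInv.2.2 l = l := by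
      rw [hl]; unfold pvL; split_ifs
      · rw [hra]; exact pvRoot_idem _ _ _
      · rw [hrb]; exact pvRoot_idem _ _ _
    exact this
  have hfixw : pvFOf p2 w = w := by
    apply pvRoot_is_fix (h := h2.2.2)
    rw [hrootsp2]
    have : pvRoot (pvFOf uf.parent) hInv.2.2 w = w := by
      rw [hw]; unfold pvW; split_ifs
      · rw [hrb]; exact pvRoot_idem _ _ _
      · rw [hra]; exact pvRoot_idem _ _ _
    exact this
  have hrooted3 : pvRooted (pvFOf (p2.set l ((w : ℕ) : ℤ))) := by
    rw [pvFOf_set p2 l (by rw [h2.1]; exact hln) w]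
    exact pvLink_rooted _ h2.2.2 l w hfixl hfixw hlw
  have hInv3 : pvInv n (p2.set l ((w : ℕ) : ℤ)) := pvInv_set h2 l w hwn hrooted3
  refine ⟨p2.set l ((w : ℕ) : ℤ), hInv3, ?_, ?_⟩
  · dsimp only [pvUnion]
    rw [hfa]
    dsimp only
    rw [hfb]
    dsimp only
    rw [hr1 (pvNidx n b)]
    rw [if_neg (by simpa using hne)]
    have hset : ∀ (l' w' : ℕ), PySem.List.pySetD p2 ((l' : ℕ) : ℤ) ((w' : ℕ) : ℤ)
        = p2.set l' ((w' : ℕ) : ℤ) := by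
      intro l' w'
      rw [PySem.List.pySetD_of_nonneg p2 _ (by omega)]
      simp
    split_ifs with hsz
    · have hw' : w = rb := by rw [hw]; unfold pvW; rw [if_pos hsz]
      have hl' : l = ra := by rw [hl]; unfold pvL; rw [if_pos hsz]
      rw [hw', hl', hset ra rb]
    · have hw' : w = ra := by rw [hw]; unfold pvW; rw [if_neg hsz]
      have hl' : l = rb := by rw [hl]; unfold pvL; rw [if_neg hsz]
      rw [hw', hl', hset rb ra]
  · intro i
    have hupd : pvFOf (p2.set l ((w : ℕ) : ℤ)) = Function.update (pvFOf p2) l w :=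
      pvFOf_set p2 l (by rw [h2.1]; exact hln) w
    have h3' : pvRooted (Function.update (pvFOf p2) l w) := by
      rw [← hupd]
      exact hInv3.2.2
    calc pvRoot (pvFOf (p2.set l ((w : ℕ) : ℤ))) hInv3.2.2 i
        = pvRoot (Function.update (pvFOf p2) l w) h3' i := pvRoot_congr_fun hupd _ h3' i
      _ = if pvRoot (pvFOf p2) h2.2.2 i = l then w else pvRoot (pvFOf p2) h2.2.2 i :=
          pvLink_root_eq (pvFOf p2) h2.2.2 l w hfixl hfixw hlw h3' i
      _ = _ := by rw [hrootsp2 i]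

-- ---------- edge validity, state relations, run-level lemmas ----------

def pvGood (edges : List (Int × Int)) (n : ℕ) : Prop :=
  ∀ e ∈ edges, -(n:ℤ) ≤ e.1 ∧ e.1 < (n:ℤ) ∧ -(n:ℤ) ≤ e.2 ∧ e.2 < (n:ℤ)

lemma pvMem_of_pyGet? {α : Type} (xs : List α) (idx : Int) (v : α)
    (hm : PySem.List.pyGet? xs idx = some v) : v ∈ xs := by
  unfold PySem.List.pyGet? at hm
  rcases hk : PySem.List.pyIdx? xs.length idx with _ | k
  · rw [hk] at hm
    simp at hm
  · rw [hk] at hm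
    simp at hm
    exact List.mem_of_getElem? hm

lemma pvEdge_ok {edges : List (Int × Int)} {n : ℕ} (hGood : pvGood edges n) (hn : 0 < n)
    (idx : Int) :
    -(n:ℤ) ≤ (PySem.List.pyGetD edges idx ((0:ℤ),(0:ℤ))).1
    ∧ (PySem.List.pyGetD edges idx ((0:ℤ),(0:ℤ))).1 < (n:ℤ)
    ∧ -(n:ℤ) ≤ (PySem.List.pyGetD edges idx ((0:ℤ),(0:ℤ))).2
    ∧ (PySem.List.pyGetD edges idx ((0:ℤ),(0:ℤ))).2 < (n:ℤ) := by
  rcases hm : PySem.List.pyGet? edges idx with _ | v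
  · have hd : PySem.List.pyGetD edges idx ((0:ℤ),(0:ℤ)) = ((0:ℤ),(0:ℤ)) := by
      simp [PySem.List.pyGetD, hm]
    rw [hd]
    show -(n:ℤ) ≤ 0 ∧ (0:ℤ) < ↑n ∧ -(n:ℤ) ≤ 0 ∧ (0:ℤ) < ↑n
    refine ⟨by omega, by omega, by omega, by omega⟩
  · have hv : v ∈ edges := pvMem_of_pyGet? edges idx v hm
    have hd : PySem.List.pyGetD edges idx ((0:ℤ),(0:ℤ)) = v := by
      simp [PySem.List.pyGetD, hm]
    rw [hd]
    exact hGood v hv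

def pvRootsEq (p q : List Int) : Prop :=
  ∀ (hp : pvRooted (pvFOf p)) (hq : pvRooted (pvFOf q)) (i : ℕ),
    pvRoot (pvFOf p) hp i = pvRoot (pvFOf q) hq i

def pvREL (n : ℕ) (σ τ : PvUF) : Prop :=
  pvInv n σ.parent ∧ pvInv n τ.parent ∧ σ.sz = τ.sz ∧ σ.nc = τ.nc ∧ pvRootsEq σ.parent τ.parent

lemma pvREL_refl {n : ℕ} {σ : PvUF} (h : pvInv n σ.parent) : pvREL n σ σ :=
  ⟨h, h, rfl, rfl, fun _ _ _ => rfl⟩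

lemma pvREL_trans {n : ℕ} {σ τ ρ : PvUF} (h1 : pvREL n σ τ) (h2 : pvREL n τ ρ) :
    pvREL n σ ρ :=
  ⟨h1.1, h2.2.1, h1.2.2.1.trans h2.2.2.1, h1.2.2.2.1.trans h2.2.2.2.1,
    fun hp hq i => (h1.2.2.2.2 hp h1.2.1.2.2 i).trans (h2.2.2.2.2 h1.2.1.2.2 hq i)⟩

-- union of two endpoints with EQUAL roots: state equivalent, flag false
lemma pvUnion_redundant {n : ℕ} (uf : PvUF) (hInv : pvInv n uf.parent) {a b : Int}
    (ha1 : -(n:ℤ) ≤ a) (ha2 : a < (n:ℤ)) (hb1 : -(n:ℤ) ≤ b) (hb2 : b < (n:ℤ))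
    (heq : pvRoot (pvFOf uf.parent) hInv.2.2 (pvNidx n a)
         = pvRoot (pvFOf uf.parent) hInv.2.2 (pvNidx n b)) :
    pvREL n (pvUnion uf a b).1 uf ∧ (pvUnion uf a b).2 = false := by
  obtain ⟨q, hq, heq', hroots⟩ := pvUnion_same uf hInv ha1 ha2 hb1 hb2 heq
  rw [heq']
  exact ⟨⟨hq, hInv, rfl, rfl, fun hp hq' i => hroots i⟩, rfl⟩

-- union with DIFFERENT roots: flag true, and the two sides of a pvREL pair stay related
lemma pvUnion_inv {n : ℕ} (uf : PvUF) (hInv : pvInv n uf.parent) {a b : Int}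
    (ha1 : -(n:ℤ) ≤ a) (ha2 : a < (n:ℤ)) (hb1 : -(n:ℤ) ≤ b) (hb2 : b < (n:ℤ)) :
    pvInv n (pvUnion uf a b).1.parent := by
  by_cases heq : pvRoot (pvFOf uf.parent) hInv.2.2 (pvNidx n a)
      = pvRoot (pvFOf uf.parent) hInv.2.2 (pvNidx n b)
  · obtain ⟨q, hq, heq', _⟩ := pvUnion_same uf hInv ha1 ha2 hb1 hb2 heq
    rw [heq']
    exact hq
  · obtain ⟨q, hq, heq', _⟩ := pvUnion_diff uf hInv ha1 ha2 hb1 hb2 heq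
    rw [heq']
    exact hq

lemma pvUnion_flag {n : ℕ} (uf : PvUF) (hInv : pvInv n uf.parent) {a b : Int}
    (ha1 : -(n:ℤ) ≤ a) (ha2 : a < (n:ℤ)) (hb1 : -(n:ℤ) ≤ b) (hb2 : b < (n:ℤ)) :
    (pvUnion uf a b).2 = decide (¬ (pvRoot (pvFOf uf.parent) hInv.2.2 (pvNidx n a)
         = pvRoot (pvFOf uf.parent) hInv.2.2 (pvNidx n b))) := by
  by_cases heq : pvRoot (pvFOf uf.parent) hInv.2.2 (pvNidx n a)
      = pvRoot (pvFOf uf.parent) hInv.2.2 (pvNidx n b)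
  · obtain ⟨q, hq, heq', _⟩ := pvUnion_same uf hInv ha1 ha2 hb1 hb2 heq
    rw [heq']
    simp [heq]
  · obtain ⟨q, hq, heq', _⟩ := pvUnion_diff uf hInv ha1 ha2 hb1 hb2 heq
    rw [heq']
    simp [heq]

def pvConn (n : ℕ) (p : List Int) (edges : List (Int × Int)) (e : Int) : Prop :=
  ∀ (h : pvRooted (pvFOf p)),
    pvRoot (pvFOf p) h (pvNidx n (PySem.List.pyGetD edges e ((0:ℤ),(0:ℤ))).1)
      = pvRoot (pvFOf p) h (pvNidx n (PySem.List.pyGetD edges e ((0:ℤ),(0:ℤ))).2)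

lemma pvConn_iff {n : ℕ} {p : List Int} {edges : List (Int × Int)} {e : Int}
    (h : pvRooted (pvFOf p)) :
    pvConn n p edges e ↔
      pvRoot (pvFOf p) h (pvNidx n (PySem.List.pyGetD edges e ((0:ℤ),(0:ℤ))).1)
        = pvRoot (pvFOf p) h (pvNidx n (PySem.List.pyGetD edges e ((0:ℤ),(0:ℤ))).2) :=
  ⟨fun hc => hc h, fun he _ => he⟩

lemma pvConn_of_rootsEq {n : ℕ} {p q : List Int} {edges : List (Int × Int)} {e : Int}
    (hp : pvRooted (pvFOf p)) (hq : pvRooted (pvFOf q)) (hre : pvRootsEq p q) :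
    pvConn n p edges e ↔ pvConn n q edges e := by
  rw [pvConn_iff hp, pvConn_iff hq, hre hp hq, hre hp hq]

lemma pvStep_def (edges : List (Int × Int)) (st : PvUF × Int) (idx : Int) :
    pvStep edges st idx =
      ((pvUnion st.1 (PySem.List.pyGetD edges idx ((0:ℤ),(0:ℤ))).1
          (PySem.List.pyGetD edges idx ((0:ℤ),(0:ℤ))).2).1,
        if (pvUnion st.1 (PySem.List.pyGetD edges idx ((0:ℤ),(0:ℤ))).1
          (PySem.List.pyGetD edges idx ((0:ℤ),(0:ℤ))).2).2 then st.2 + 1 else st.2) := rfl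

lemma pvStep_redundant {n : ℕ} {edges : List (Int × Int)} (hGood : pvGood edges n)
    {σ : PvUF} (hInv : pvInv n σ.parent) (r : Int) (idx : Int)
    (hconn : pvConn n σ.parent edges idx) :
    pvREL n (pvStep edges (σ, r) idx).1 σ ∧ (pvStep edges (σ, r) idx).2 = r := by
  have hb := pvEdge_ok hGood (pvInv_pos hInv) idx
  have hu := pvUnion_redundant σ hInv hb.1 hb.2.1 hb.2.2.1 hb.2.2.2
    ((pvConn_iff hInv.2.2).mp hconn)
  constructor
  · rw [pvStep_def]
    exact hu.1
  · rw [pvStep_def]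
    simp [hu.2]

lemma pvStep_new {n : ℕ} {edges : List (Int × Int)} (hGood : pvGood edges n)
    {σ : PvUF} (hInv : pvInv n σ.parent) (r : Int) (idx : Int)
    (hnc : ¬ pvConn n σ.parent edges idx) :
    pvInv n (pvStep edges (σ, r) idx).1.parent ∧ (pvStep edges (σ, r) idx).2 = r + 1 := by
  have hb := pvEdge_ok hGood (pvInv_pos hInv) idx
  have hflag := pvUnion_flag σ hInv hb.1 hb.2.1 hb.2.2.1 hb.2.2.2
  have hne := (pvConn_iff (n := n) (edges := edges) (e := idx) hInv.2.2).not.mp hnc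
  constructor
  · rw [pvStep_def]
    exact pvUnion_inv σ hInv hb.1 hb.2.1 hb.2.2.1 hb.2.2.2
  · rw [pvStep_def]
    simp [hflag, hne]

lemma pvRun_append (edges : List (Int × Int)) (n_sub : Int) (cl : List Int) (e : Int) :
    pvRun edges n_sub (cl ++ [e]) = pvStep edges (pvRun edges n_sub cl) e := by
  simp [pvRun, List.foldl_append]

lemma pvRank_append {edges : List (Int × Int)} {n_sub : Int} {n : ℕ}
    (hGood : pvGood edges n) (cl : List Int) (e : Int)
    (hInv : pvInv n (pvRun edges n_sub cl).1.parent) :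
    pvRank edges n_sub (cl ++ [e]) =
      if pvRoot (pvFOf (pvRun edges n_sub cl).1.parent) hInv.2.2
            (pvNidx n (PySem.List.pyGetD edges e ((0:ℤ),(0:ℤ))).1)
          = pvRoot (pvFOf (pvRun edges n_sub cl).1.parent) hInv.2.2
            (pvNidx n (PySem.List.pyGetD edges e ((0:ℤ),(0:ℤ))).2)
      then pvRank edges n_sub cl else pvRank edges n_sub cl + 1 := by
  unfold pvRank
  rw [pvRun_append]
  by_cases hc : pvRoot (pvFOf (pvRun edges n_sub cl).1.parent) hInv.2.2
      (pvNidx n (PySem.List.pyGetD edges e ((0:ℤ),(0:ℤ))).1)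
    = pvRoot (pvFOf (pvRun edges n_sub cl).1.parent) hInv.2.2
      (pvNidx n (PySem.List.pyGetD edges e ((0:ℤ),(0:ℤ))).2)
  · rw [if_pos hc]
    exact (pvStep_redundant hGood hInv (pvRun edges n_sub cl).2 e
      ((pvConn_iff hInv.2.2).mpr hc)).2
  · rw [if_neg hc]
    exact (pvStep_new hGood hInv (pvRun edges n_sub cl).2 e
      (fun hcc => hc ((pvConn_iff hInv.2.2).mp hcc))).2

lemma pvStepB_spec {n : ℕ} {edges : List (Int × Int)} (hGood : pvGood edges n)
    {ufB : PvUF} (hInv : pvInv n ufB.parent) (cl : List Int) (e : Int)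
    (hmem : cl.contains e = false) :
    ∃ (q : List Int) (hq : pvInv n q),
      pvStepB edges (ufB, cl) e =
        (⟨q, ufB.sz, ufB.nc⟩,
          if pvRoot (pvFOf ufB.parent) hInv.2.2
                (pvNidx n (PySem.List.pyGetD edges e ((0:ℤ),(0:ℤ))).1)
              = pvRoot (pvFOf ufB.parent) hInv.2.2
                (pvNidx n (PySem.List.pyGetD edges e ((0:ℤ),(0:ℤ))).2)
          then cl ++ [e] else cl)
      ∧ pvRootsEq q ufB.parent := by
  have hb := pvEdge_ok hGood (pvInv_pos hInv) e
  obtain ⟨p1, h1, hfu, hr1⟩ := pvFind_ok ufB.parent hInv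
    (PySem.List.pyGetD edges e ((0:ℤ),(0:ℤ))).1 hb.1 hb.2.1
  obtain ⟨p2, h2, hfv, hr2⟩ := pvFind_ok p1 h1
    (PySem.List.pyGetD edges e ((0:ℤ),(0:ℤ))).2 hb.2.2.1 hb.2.2.2
  refine ⟨p2, h2, ?_, fun hp hq i => (hr2 i).trans (hr1 i)⟩
  dsimp only [pvStepB]
  rw [if_neg (by rw [hmem]; exact Bool.false_ne_true)]
  rw [hfu]
  dsimp only
  rw [hfv]
  dsimp only
  rw [hr1 (pvNidx n (PySem.List.pyGetD edges e ((0:ℤ),(0:ℤ))).2)]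
  by_cases hc : pvRoot (pvFOf ufB.parent) hInv.2.2
      (pvNidx n (PySem.List.pyGetD edges e ((0:ℤ),(0:ℤ))).1)
    = pvRoot (pvFOf ufB.parent) hInv.2.2
      (pvNidx n (PySem.List.pyGetD edges e ((0:ℤ),(0:ℤ))).2)
  · rw [if_pos (by exact_mod_cast hc), if_pos hc]
  · rw [if_neg (fun hcast => hc (by exact_mod_cast hcast)), if_neg hc]

lemma pvInit_inv (n_sub : Int) (hn : 0 < n_sub.toNat) :
    pvInv n_sub.toNat (pvInit n_sub).parent := by
  have hent : ∀ j : ℕ, 0 ≤ ((pvInit n_sub).parent.getD j 0)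
      ∧ (((pvInit n_sub).parent.getD j 0)).toNat < n_sub.toNat := by
    intro j
    by_cases hj : j < n_sub.toNat
    · rw [show (pvInit n_sub).parent = (List.range n_sub.toNat).map Int.ofNat from rfl,
        List.getD_eq_getElem _ 0 (by simpa using hj), List.getElem_map, List.getElem_range]
      constructor
      · exact Int.natCast_nonneg _
      · simpa using hj
    · rw [show (pvInit n_sub).parent = (List.range n_sub.toNat).map Int.ofNat from rfl,
        List.getD_eq_getElem?_getD, List.getElem?_eq_none (by simpa using Nat.le_of_not_lt hj)]
      exact ⟨le_refl 0, hn⟩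
  have hid : ∀ m : ℕ, m < n_sub.toNat → pvFOf (pvInit n_sub).parent m = m := by
    intro m hm
    unfold pvFOf
    rw [show (pvInit n_sub).parent = (List.range n_sub.toNat).map Int.ofNat from rfl,
      List.getD_eq_getElem _ 0 (by simpa using hm), List.getElem_map, List.getElem_range]
    rfl
  refine ⟨by simp [pvInit], hent, fun i => ⟨1, ?_⟩⟩
  have h1 : (pvFOf (pvInit n_sub).parent)^[1] i = pvFOf (pvInit n_sub).parent i :=
    Function.iterate_one _ ▸ rfl
  rw [show (1:ℕ)+1 = 2 from rfl]
  have h2 : (pvFOf (pvInit n_sub).parent)^[2] i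
      = pvFOf (pvInit n_sub).parent (pvFOf (pvInit n_sub).parent i) := by
    rw [show (2:ℕ) = 1 + 1 from rfl, Function.iterate_succ_apply', h1]
  rw [h2, h1]
  exact hid _ (hent i).2

lemma pvFold_inv {edges : List (Int × Int)} {n : ℕ} (hGood : pvGood edges n) :
    ∀ (L : List Int) (st : PvUF × Int), pvInv n st.1.parent →
      pvInv n (L.foldl (pvStep edges) st).1.parent := by
  intro L
  induction L with
  | nil => exact fun st h => h
  | cons e L ih =>
      intro st h
      rw [List.foldl_cons]
      apply ih
      have hb := pvEdge_ok hGood (pvInv_pos h) e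
      exact pvUnion_inv st.1 h hb.1 hb.2.1 hb.2.2.1 hb.2.2.2

lemma pvRun_inv {edges : List (Int × Int)} {n_sub : Int}
    (hGood : pvGood edges n_sub.toNat) (hn : 0 < n_sub.toNat) (L : List Int) :
    pvInv n_sub.toNat (pvRun edges n_sub L).1.parent :=
  pvFold_inv hGood L _ (pvInit_inv n_sub hn)

lemma pvBuild_eq_run (edges : List (Int × Int)) :
    ∀ (L : List Int) (st : PvUF × Int),
      (L.foldl (pvStep edges) st).1
        = L.foldl (fun uf i =>
            let e := PySem.List.pyGetD edges i ((0 : Int), (0 : Int))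
            (pvUnion uf e.1 e.2).1) st.1 := by
  intro L
  induction L with
  | nil => exact fun st => rfl
  | cons e L ih =>
      intro st
      rw [List.foldl_cons, List.foldl_cons]
      exact ih (pvStep edges st e)

lemma pvBuildUF_eq (edges : List (Int × Int)) (n_sub : Int) (L : List Int) :
    pvBuildUF edges n_sub L = (pvRun edges n_sub L).1 :=
  (pvBuild_eq_run edges L (pvInit n_sub, 0)).symm

lemma pvAB_fold {edges : List (Int × Int)} {n_sub : Int}
    (hGood : pvGood edges n_sub.toNat) (hn : 0 < n_sub.toNat)
    (σS : PvUF) (hIS : pvInv n_sub.toNat σS.parent) (rS : Int) :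
    ∀ (L cl : List Int) (ufB : PvUF) (hInvB : pvInv n_sub.toNat ufB.parent),
      pvRootsEq ufB.parent σS.parent →
      pvREL n_sub.toNat (pvRun edges n_sub cl).1 σS →
      pvRank edges n_sub cl = rS →
      (L.foldl (pvStepA edges n_sub rS) cl = (L.foldl (pvStepB edges) (ufB, cl)).2)
      ∧ pvREL n_sub.toNat (pvRun edges n_sub (L.foldl (pvStepA edges n_sub rS) cl)).1 σS
      ∧ pvRank edges n_sub (L.foldl (pvStepA edges n_sub rS) cl) = rS
      ∧ (∀ e ∈ L, e ∉ L.foldl (pvStepA edges n_sub rS) cl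
          → ¬ pvConn n_sub.toNat σS.parent edges e)
      ∧ (∀ e, e ∈ cl → e ∈ L.foldl (pvStepA edges n_sub rS) cl) := by
  intro L
  induction L with
  | nil =>
      intro cl ufB hInvB hBroots hREL hrank
      exact ⟨rfl, hREL, hrank, by simp, fun e he => he⟩
  | cons e L ih =>
    intro cl ufB hInvB hBroots hREL hrank
    rw [List.foldl_cons, List.foldl_cons]
    by_cases hmem : cl.contains e
    · have hA : pvStepA edges n_sub rS cl e = cl := by
        simp only [pvStepA]
        rw [if_pos hmem]
      have hB : pvStepB edges (ufB, cl) e = (ufB, cl) := by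
        simp only [pvStepB]
        rw [if_pos hmem]
      rw [hA, hB]
      obtain ⟨h1, h2, h3, h4, h5⟩ := ih cl ufB hInvB hBroots hREL hrank
      refine ⟨h1, h2, h3, ?_, h5⟩
      intro e' he' hnot
      rcases List.mem_cons.mp he' with rfl | hL
      · exact absurd (h5 e' (List.contains_iff_mem.mp hmem)) hnot
      · exact h4 e' hL hnot
    · have hmemf : cl.contains e = false := by
        rwa [Bool.not_eq_true] at hmem
      have hIcl : pvInv n_sub.toNat (pvRun edges n_sub cl).1.parent := hREL.1
      have hconn_iff : pvConn n_sub.toNat (pvRun edges n_sub cl).1.parent edges e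
          ↔ pvConn n_sub.toNat σS.parent edges e :=
        pvConn_of_rootsEq hIcl.2.2 hIS.2.2 hREL.2.2.2.2
      have hrapp := pvRank_append (n_sub := n_sub) hGood cl e hIcl
      obtain ⟨q, hq, hBeq, hqroots⟩ := pvStepB_spec hGood hInvB cl e hmemf
      have hBconn_iff : pvConn n_sub.toNat ufB.parent edges e
          ↔ pvConn n_sub.toNat σS.parent edges e :=
        pvConn_of_rootsEq hInvB.2.2 hIS.2.2 hBroots
      have hqB : pvRootsEq q σS.parent := fun hp hq' i =>
        (hqroots hp hInvB.2.2 i).trans (hBroots hInvB.2.2 hq' i)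
      by_cases hconn : pvConn n_sub.toNat σS.parent edges e
      · have htest : pvRank edges n_sub (cl ++ [e]) = rS := by
          rw [hrapp, if_pos ((pvConn_iff hIcl.2.2).mp (hconn_iff.mpr hconn)), hrank]
        have hA : pvStepA edges n_sub rS cl e = cl ++ [e] := by
          simp only [pvStepA]
          rw [if_neg (by rw [hmemf]; exact Bool.false_ne_true), if_pos htest]
        have hB : pvStepB edges (ufB, cl) e = (⟨q, ufB.sz, ufB.nc⟩, cl ++ [e]) := by
          rw [hBeq, if_pos ((pvConn_iff hInvB.2.2).mp (hBconn_iff.mpr hconn))]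
        rw [hA, hB]
        have hred := pvStep_redundant hGood hIcl (pvRun edges n_sub cl).2 e
          (hconn_iff.mpr hconn)
        have hREL' : pvREL n_sub.toNat (pvRun edges n_sub (cl ++ [e])).1 σS := by
          rw [pvRun_append]
          exact pvREL_trans hred.1 hREL
        obtain ⟨h1, h2, h3, h4, h5⟩ := ih (cl ++ [e]) ⟨q, ufB.sz, ufB.nc⟩ hq hqB hREL' htest
        refine ⟨h1, h2, h3, ?_, fun e' he' => h5 e' (List.mem_append_left _ he')⟩
        intro e' he' hnot
        rcases List.mem_cons.mp he' with rfl | hL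
        · exact absurd (h5 e' (List.mem_append_right _ (by simp))) hnot
        · exact h4 e' hL hnot
      · have htest : pvRank edges n_sub (cl ++ [e]) = rS + 1 := by
          rw [hrapp, if_neg (fun hc =>
            hconn (hconn_iff.mp ((pvConn_iff hIcl.2.2).mpr hc))), hrank]
        have hA : pvStepA edges n_sub rS cl e = cl := by
          simp only [pvStepA]
          rw [if_neg (by rw [hmemf]; exact Bool.false_ne_true), if_neg (by rw [htest]; omega)]
        have hB : pvStepB edges (ufB, cl) e = (⟨q, ufB.sz, ufB.nc⟩, cl) := by
          rw [hBeq, if_neg (fun hc =>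
            hconn (hBconn_iff.mp ((pvConn_iff hInvB.2.2).mpr hc)))]
        rw [hA, hB]
        obtain ⟨h1, h2, h3, h4, h5⟩ := ih cl ⟨q, ufB.sz, ufB.nc⟩ hq hqB hREL hrank
        refine ⟨h1, h2, h3, ?_, h5⟩
        intro e' he' hnot
        rcases List.mem_cons.mp he' with rfl | hL
        · exact hconn
        · exact h4 e' hL hnot

lemma pvFoldS_noop {edges : List (Int × Int)} {n_sub : Int} (cl : List Int) (rcl : Int) :
    ∀ (L : List Int),
      (∀ e ∈ L, cl.contains e = false → pvRank edges n_sub (cl ++ [e]) ≠ rcl) →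
      L.foldl (pvStepS edges n_sub rcl) (cl, false) = (cl, false) := by
  intro L
  induction L with
  | nil => exact fun _ => rfl
  | cons e L ih =>
      intro hL
      rw [List.foldl_cons]
      have hstep : pvStepS edges n_sub rcl (cl, false) e = (cl, false) := by
        simp only [pvStepS]
        by_cases hm : cl.contains e
        · rw [if_pos hm]
        · have hmf : cl.contains e = false := by rwa [Bool.not_eq_true] at hm
          rw [if_neg (by rw [hmf]; exact Bool.false_ne_true),
            if_neg (hL e (by simp) hmf)]
      rw [hstep]
      exact ih (fun e' he' => hL e' (List.mem_cons_of_mem _ he'))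

lemma pvStabilize_noop {edges : List (Int × Int)} {n_sub : Int} (m k : ℕ) (cl : List Int)
    (hnochange : ∀ e ∈ pvIdxs m, cl.contains e = false
      → pvRank edges n_sub (cl ++ [e]) ≠ pvRank edges n_sub cl) :
    pvStabilize edges n_sub m (k+1) cl = cl := by
  dsimp only [pvStabilize]
  rw [pvFoldS_noop cl (pvRank edges n_sub cl) (pvIdxs m) hnochange]
  simp

lemma pvClosure_eq_main (edges : List (Int × Int)) (n_sub : Int)
    (hGood : pvGood edges n_sub.toNat) (hn : 0 < n_sub.toNat) (S : List Int) :
    pvClosureA edges n_sub S = pvClosureB edges n_sub S := by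
  have hIS : pvInv n_sub.toNat (pvRun edges n_sub (PySem.Set.ofList S)).1.parent :=
    pvRun_inv hGood hn _
  obtain ⟨h1, h2, h3, h4, h5⟩ :=
    pvAB_fold hGood hn (pvRun edges n_sub (PySem.Set.ofList S)).1 hIS
      (pvRank edges n_sub (PySem.Set.ofList S)) (pvIdxs edges.length)
      (PySem.Set.ofList S) (pvRun edges n_sub (PySem.Set.ofList S)).1 hIS
      (fun _ _ _ => rfl) (pvREL_refl hIS) rfl
  dsimp only [pvClosureA, pvClosureB]
  rw [pvBuildUF_eq, ← h1]
  apply pvStabilize_noop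
  intro e he hmem
  rw [pvRank_append (n_sub := n_sub) hGood _ e h2.1, h3]
  have hnotin : e ∉ (pvIdxs edges.length).foldl
      (pvStepA edges n_sub (pvRank edges n_sub (PySem.Set.ofList S)))
      (PySem.Set.ofList S) := fun hin => by
    rw [List.contains_iff_mem.mpr hin] at hmem
    simp at hmem
  have hncS : ¬ pvConn n_sub.toNat (pvRun edges n_sub (PySem.Set.ofList S)).1.parent edges e :=
    h4 e he hnotin
  have hnc : ¬ pvConn n_sub.toNat
      (pvRun edges n_sub ((pvIdxs edges.length).foldl
        (pvStepA edges n_sub (pvRank edges n_sub (PySem.Set.ofList S)))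
        (PySem.Set.ofList S))).1.parent edges e :=
    fun hc => hncS ((pvConn_of_rootsEq h2.1.2.2 hIS.2.2 h2.2.2.2.2).mp hc)
  rw [if_neg (fun hc => hnc ((pvConn_iff h2.1.2.2).mpr hc))]
  omega

-- ---------- the no-edges case and the final equality ----------

lemma pvClosure_eq_nil (n_sub : Int) (S : List Int) :
    pvClosureA [] n_sub S = pvClosureB [] n_sub S := by
  dsimp only [pvClosureA, pvClosureB, pvIdxs]
  simp [pvStabilize, pvIdxs]


-- ===== VERDICT (by name: the statement is the Claim_ definition above) =====
theorem lattice_of_flats_py_spec : Claim_equal_lattice_of_flats_py := by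
  intro edges n_sub hdom hpre
  unfold Spec_lattice_of_flats_py lattice_of_flats_py lattice_of_flats_py_alt
  by_cases hedges : edges = []
  · subst hedges
    rw [funext (pvClosure_eq_nil n_sub)]
  · obtain ⟨e0, he0⟩ := List.exists_mem_of_ne_nil edges hedges
    have hb0 := hpre e0 he0
    have hn : 0 < n_sub.toNat := by omega
    have hGood : pvGood edges n_sub.toNat := by
      intro e he
      have := hpre e he
      refine ⟨by omega, by omega, by omega, by omega⟩
    rw [funext (pvClosure_eq_main edges n_sub hGood hn)]
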